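-- pv_equiv track=rewrite | github.com/addibble/delete_commercials | delete_commercials.py | detect_rough_commercials
-- ===== SOURCE A (Python) =====
-- from collections import deque
--
-- def detect_rough_commercials(pairs, maxlen=10):
--     def r(pivot1, pivot2, stack, maxlen=maxlen):
--         for try_pivot1, try_pivot2 in zip(range(pivot1+1,pivot1+maxlen), range(pivot2+1,pivot2+maxlen)):
--             if(try_pivot1 in pairs and try_pivot2 in pairs[try_pivot1]):
--                 stack.append(try_pivot1)
--                 return r(try_pivot1, try_pivot2, stack, maxlen=maxlen)
--         return stack
--
--     l=deque()
--     prev_max=0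
--     for pivot1 in sorted(pairs.keys()):
--         if pivot1 < prev_max:
--             continue
--         for pivot2 in sorted(pairs[pivot1]):
--             s=r(pivot1, pivot2, [], maxlen=maxlen)
--             if s:
--                 l += s
--                 prev_max = max(s)
--
--     return sorted(set(l))
-- ===== SOURCE B (Python) =====
-- def detect_rough_commercials(pairs, maxlen=10):
--     # the match condition "t1 in pairs and t2 in pairs[t1]" is membership of the
--     # tuple (t1, t2) in the flat set of (key, value) pairs
--     pairset = {(k, v) for k in pairs for v in pairs[k]}
--
--     def step(a, b):
--         # first diagonal offset within maxlen that hits another pair, else None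
--         for d in range(1, maxlen):
--             if (a + d, b + d) in pairset:
--                 return (a + d, b + d)
--         return None
--
--     # one flat pass over all (key, value) starting points, first-of-its-key marked
--     flat = [(k, v, i == 0)
--             for k in sorted(pairs)
--             for i, v in enumerate(sorted(pairs[k]))]
--
--     result = set()
--     prev_max = 0
--     skip = False
--     for p1, p2, first in flat:
--         if first:
--             skip = p1 < prev_max
--         if skip:
--             continue
--         nxt = step(p1, p2)
--         while nxt is not None:
--             result.add(nxt[0])
--             prev_max = nxt[0]
--             nxt = step(*nxt)
--     return sorted(result)
-- ===== Notes on version B (the rewrite author's own statement) =====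
-- stated objective: alternative
-- what changed: The match test 't1 in pairs and t2 in pairs[t1]' becomes membership of the tuple (t1,t2) in one flat set of (key,value) pairs, the recursive accumulator helper r is replaced by a stepper function chased in a while loop that adds hits directly into the result set (no intermediate chain lists, no sorted(set(...)) dedup of a deque), and the two nested pivot loops are flattened into a single pass over a first-of-key-marked list of starting points.
import Mathlib
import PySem

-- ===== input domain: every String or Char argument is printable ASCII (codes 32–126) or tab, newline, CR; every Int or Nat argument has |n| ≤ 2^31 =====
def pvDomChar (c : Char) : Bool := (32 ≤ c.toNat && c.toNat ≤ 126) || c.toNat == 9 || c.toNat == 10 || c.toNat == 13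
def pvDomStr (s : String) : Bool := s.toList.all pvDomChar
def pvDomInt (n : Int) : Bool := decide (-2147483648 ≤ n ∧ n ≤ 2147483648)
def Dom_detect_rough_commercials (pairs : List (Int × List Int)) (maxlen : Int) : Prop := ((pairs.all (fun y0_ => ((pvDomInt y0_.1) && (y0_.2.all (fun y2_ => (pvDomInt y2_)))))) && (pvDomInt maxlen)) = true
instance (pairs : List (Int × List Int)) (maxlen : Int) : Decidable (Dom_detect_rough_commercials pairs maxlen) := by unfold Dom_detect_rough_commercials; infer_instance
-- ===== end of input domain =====

-- B rephrases the match test "t1 in pairs and t2 in pairs[t1]" as membership of the tuple (t1,t2)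
-- in one flat set of (key,value) pairs, replaces the recursive accumulator helper r by a stepper
-- function chased in a while loop that adds hits straight into the result set, and flattens the two
-- nested pivot loops into one pass over a first-of-key-marked list (objective: alternative, same cost).

-- ===== PORT A =====
-- the recursive helper r; fuel bounds the recursion (each step moves to a strictly larger key,
-- so d.keys.length + 1 steps always suffice and the fuel branch is never the result)
def pvRA (d : PySem.Dict Int (List Int)) (maxlen : Int) :
    Nat → Int → Int → List Int → List Int
  | 0, _, _, stack => stack
  | fuel+1, p1, p2, stack =>
    match (List.zip (PySem.List.pyRange (p1+1) (p1+maxlen) 1)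
                    (PySem.List.pyRange (p2+1) (p2+maxlen) 1)).find?
            (fun t => d.contains t.1 && (d.getD t.1 []).contains t.2) with
    | some t => pvRA d maxlen fuel t.1 t.2 (stack ++ [t.1])
    | none => stack

def detect_rough_commercials (pairs : List (Int × List Int)) (maxlen : Int) : List Int :=
  let d := PySem.Dict.ofList pairs
  let res := (PySem.List.sorted d.keys (fun x => x) false).foldl
    (fun (st : List Int × Int) p1 =>
      if p1 < st.2 then st
      else (PySem.List.sorted (d.getD p1 []) (fun x => x) false).foldl
        (fun (st : List Int × Int) p2 =>
          let s := pvRA d maxlen (d.keys.length + 1) p1 p2 []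
          if s ≠ [] then (st.1 ++ s, (PySem.List.max? s (fun x => x)).getD st.2)
          else st) st)
    ([], 0)
  PySem.List.sorted (PySem.Set.ofList res.1) (fun x => x) false

-- ===== PORT B =====
-- step(a, b): the first diagonal offset within maxlen that hits another (key, value) pair
def pvStepB (ps : PySem.Set (Int × Int)) (maxlen : Int) (a b : Int) : Option (Int × Int) :=
  ((PySem.List.pyRange 1 maxlen 1).find?
      (fun dd => PySem.Set.contains ps (a + dd, b + dd))).map (fun dd => (a + dd, b + dd))

-- the while loop chasing step; fuel bounds it (each hit has a strictly larger, fresh key,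
-- so d.keys.length + 1 iterations always suffice and the fuel branch is never the result)
def pvWalkB (ps : PySem.Set (Int × Int)) (maxlen : Int) :
    Nat → Option (Int × Int) → PySem.Set Int × Int → PySem.Set Int × Int
  | 0, _, st => st
  | _ + 1, none, st => st
  | fuel + 1, some t, st =>
      pvWalkB ps maxlen fuel (pvStepB ps maxlen t.1 t.2) (PySem.Set.add st.1 t.1, t.1)

def detect_rough_commercials_alt (pairs : List (Int × List Int)) (maxlen : Int) : List Int :=
  let d := PySem.Dict.ofList pairs
  let ps : PySem.Set (Int × Int) :=
    PySem.Set.ofList (d.items.flatMap (fun kv => kv.2.map (fun v => (kv.1, v))))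
  let flat := (PySem.List.sorted d.keys (fun x => x) false).flatMap
      (fun k => (PySem.List.enumerate (PySem.List.sorted (d.getD k []) (fun x => x) false)).map
        (fun iv => (k, iv.2, iv.1 == 0)))
  let st := flat.foldl
    (fun (st : PySem.Set Int × Int × Bool) e =>
      let skip := if e.2.2 then decide (e.1 < st.2.1) else st.2.2
      if skip then (st.1, st.2.1, skip)
      else
        let rp := pvWalkB ps maxlen (d.keys.length + 1) (pvStepB ps maxlen e.1 e.2.1) (st.1, st.2.1)
        (rp.1, rp.2, skip))
    (PySem.Set.empty, 0, false)
  PySem.List.sorted st.1 (fun x => x) false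

-- ===== PRECONDITION & SPEC =====
def Spec_detect_rough_commercials (pairs : List (Int × List Int)) (maxlen : Int) (out : List Int) : Prop := out = detect_rough_commercials_alt pairs maxlen
instance (pairs : List (Int × List Int)) (maxlen : Int) (out : List Int) : Decidable (Spec_detect_rough_commercials pairs maxlen out) := by unfold Spec_detect_rough_commercials; infer_instance

-- ===== CLAIM (what is proved, stated in full; the proofs are below) =====
def Claim_equal_detect_rough_commercials : Prop := ∀ (pairs : List (Int × List Int)) (maxlen : Int), Dom_detect_rough_commercials pairs maxlen → Spec_detect_rough_commercials pairs maxlen (detect_rough_commercials pairs maxlen)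

-- ===== LEMMAS AND PROOFS =====

-- named copies of the two loop bodies (definitionally equal to the inline lambdas of the ports)
def pvGA (d : PySem.Dict Int (List Int)) (maxlen : Int) (F : Nat) (p1 : Int)
    (st : List Int × Int) (p2 : Int) : List Int × Int :=
  let s := pvRA d maxlen F p1 p2 []
  if s ≠ [] then (st.1 ++ s, (PySem.List.max? s (fun x => x)).getD st.2) else st

def pvFA (d : PySem.Dict Int (List Int)) (maxlen : Int) (F : Nat)
    (st : List Int × Int) (p1 : Int) : List Int × Int :=
  if p1 < st.2 then st
  else (PySem.List.sorted (d.getD p1 []) (fun x => x) false).foldl (pvGA d maxlen F p1) st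

def pvFB (ps : PySem.Set (Int × Int)) (maxlen : Int) (F : Nat)
    (st : PySem.Set Int × Int × Bool) (e : Int × Int × Bool) : PySem.Set Int × Int × Bool :=
  let skip := if e.2.2 then decide (e.1 < st.2.1) else st.2.2
  if skip then (st.1, st.2.1, skip)
  else
    let rp := pvWalkB ps maxlen F (pvStepB ps maxlen e.1 e.2.1) (st.1, st.2.1)
    (rp.1, rp.2, skip)

theorem pv_portA_eq (pairs : List (Int × List Int)) (maxlen : Int) :
    detect_rough_commercials pairs maxlen =
      PySem.List.sorted (PySem.Set.ofList
        (((PySem.List.sorted (PySem.Dict.ofList pairs).keys (fun x => x) false).foldl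
            (pvFA (PySem.Dict.ofList pairs) maxlen ((PySem.Dict.ofList pairs).keys.length + 1))
            ([], 0)).1)) (fun x => x) false := rfl

theorem pv_portB_eq (pairs : List (Int × List Int)) (maxlen : Int) :
    detect_rough_commercials_alt pairs maxlen =
      PySem.List.sorted
        (((((PySem.List.sorted (PySem.Dict.ofList pairs).keys (fun x => x) false).flatMap (fun k =>
            (PySem.List.enumerate (PySem.List.sorted ((PySem.Dict.ofList pairs).getD k []) (fun x => x) false)).map
              (fun iv => (k, iv.2, iv.1 == 0)))).foldl
            (pvFB (PySem.Set.ofList ((PySem.Dict.ofList pairs).items.flatMap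
                (fun kv => kv.2.map (fun v => (kv.1, v))))) maxlen
              ((PySem.Dict.ofList pairs).keys.length + 1))
            (PySem.Set.empty, 0, false))).1) (fun x => x) false := rfl

theorem pv_contains_pairset (d : PySem.Dict Int (List Int)) (hnd : d.keys.Nodup) (t1 t2 : Int) :
    PySem.Set.contains
        (PySem.Set.ofList (d.items.flatMap (fun kv => kv.2.map (fun v => (kv.1, v))))) (t1, t2)
      = (d.contains t1 && (d.getD t1 []).contains t2) := by
  rw [Bool.eq_iff_iff]
  simp only [PySem.Set.contains_iff, PySem.Set.mem_ofList, List.mem_flatMap, List.mem_map,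
    Bool.and_eq_true]
  constructor
  · rintro ⟨kv, hkv, v, hv, heq⟩
    have h1 : kv.1 = t1 := congrArg Prod.fst heq
    have h2 : v = t2 := congrArg Prod.snd heq
    subst h2
    have hget : d.get? kv.1 = some kv.2 := PySem.Dict.get?_of_mem_items d hkv hnd
    constructor
    · rw [← h1, PySem.Dict.contains_eq_isSome_get?, hget]; rfl
    · rw [← h1, PySem.Dict.getD_eq_get?_getD, hget]
      simpa using hv
  · rintro ⟨hc2, hv⟩
    have hsome : (d.get? t1).isSome := by rw [← PySem.Dict.contains_eq_isSome_get?, hc2]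
    obtain ⟨vs, hvs⟩ := Option.isSome_iff_exists.mp hsome
    refine ⟨(t1, vs), PySem.Dict.mem_items_of_get?_eq_some d hvs, t2, ?_, rfl⟩
    rw [PySem.Dict.getD_eq_get?_getD, hvs] at hv
    simpa using hv

theorem pv_zip_ranges (p1 p2 maxlen : Int) :
    List.zip (PySem.List.pyRange (p1+1) (p1+maxlen) 1) (PySem.List.pyRange (p2+1) (p2+maxlen) 1)
      = (PySem.List.pyRange 1 maxlen 1).map (fun dd => (p1+dd, p2+dd)) := by
  rw [PySem.List.pyRange_one, PySem.List.pyRange_one, PySem.List.pyRange_one]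
  have e1 : (p1 + maxlen - (p1+1)) = maxlen - 1 := by ring
  have e2 : (p2 + maxlen - (p2+1)) = maxlen - 1 := by ring
  rw [e1, e2, List.zip_map']
  simp [List.map_map, Function.comp]
  ring_nf
  simp

theorem pv_step_eq (d : PySem.Dict Int (List Int)) (ps : PySem.Set (Int × Int)) (maxlen : Int)
    (hc : ∀ t1 t2, PySem.Set.contains ps (t1, t2) = (d.contains t1 && (d.getD t1 []).contains t2))
    (p1 p2 : Int) :
    (List.zip (PySem.List.pyRange (p1+1) (p1+maxlen) 1) (PySem.List.pyRange (p2+1) (p2+maxlen) 1)).find?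
        (fun t => d.contains t.1 && (d.getD t.1 []).contains t.2)
      = pvStepB ps maxlen p1 p2 := by
  rw [pv_zip_ranges, List.find?_map]
  unfold pvStepB
  have hpred : ((fun t : Int × Int => d.contains t.1 && (d.getD t.1 []).contains t.2)
      ∘ fun dd => (p1 + dd, p2 + dd))
      = (fun dd => PySem.Set.contains ps (p1 + dd, p2 + dd)) := by
    funext dd; exact (hc (p1 + dd) (p2 + dd)).symm
  rw [hpred]

theorem pv_step_lt (ps : PySem.Set (Int × Int)) (maxlen p1 p2 : Int) (t : Int × Int)
    (h : pvStepB ps maxlen p1 p2 = some t) : p1 < t.1 := by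
  unfold pvStepB at h
  cases hf : (PySem.List.pyRange 1 maxlen 1).find?
      (fun dd => PySem.Set.contains ps (p1 + dd, p2 + dd)) with
  | none => rw [hf] at h; simp at h
  | some dd =>
    rw [hf] at h
    have hdd : dd ∈ PySem.List.pyRange 1 maxlen 1 := List.mem_of_find?_eq_some hf
    rw [PySem.List.mem_pyRange_one] at hdd
    simp only [Option.map_some, Option.some.injEq] at h
    subst h
    simp only []
    omega

theorem pvRA_append (d : PySem.Dict Int (List Int)) (maxlen : Int) :
    ∀ (fuel : Nat) (p1 p2 : Int) (stack : List Int),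
      pvRA d maxlen fuel p1 p2 stack = stack ++ pvRA d maxlen fuel p1 p2 [] := by
  intro fuel
  induction fuel with
  | zero => intro p1 p2 stack; simp [pvRA]
  | succ n ih =>
    intro p1 p2 stack
    simp only [pvRA]
    cases h : (List.zip (PySem.List.pyRange (p1+1) (p1+maxlen) 1)
                        (PySem.List.pyRange (p2+1) (p2+maxlen) 1)).find?
        (fun t => d.contains t.1 && (d.getD t.1 []).contains t.2) with
    | none => simp
    | some t =>
      simp only []
      rw [ih t.1 t.2 (stack ++ [t.1]), ih t.1 t.2 ([] ++ [t.1])]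
      simp

theorem pv_chain_pairwise (d : PySem.Dict Int (List Int)) (ps : PySem.Set (Int × Int)) (maxlen : Int)
    (hc : ∀ t1 t2, PySem.Set.contains ps (t1, t2) = (d.contains t1 && (d.getD t1 []).contains t2)) :
    ∀ (fuel : Nat) (p1 p2 : Int),
      (pvRA d maxlen fuel p1 p2 []).Pairwise (· < ·) ∧ ∀ x ∈ pvRA d maxlen fuel p1 p2 [], p1 < x := by
  intro fuel
  induction fuel with
  | zero => intro p1 p2; simp [pvRA]
  | succ n ih =>
    intro p1 p2
    simp only [pvRA, pv_step_eq d ps maxlen hc p1 p2]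
    cases h : pvStepB ps maxlen p1 p2 with
    | none => simp
    | some t =>
      have hlt : p1 < t.1 := pv_step_lt ps maxlen p1 p2 t h
      simp only []
      rw [pvRA_append d maxlen n t.1 t.2 ([] ++ [t.1])]
      obtain ⟨hpw, hgt⟩ := ih t.1 t.2
      simp only [List.nil_append, List.singleton_append]
      constructor
      · exact List.pairwise_cons.mpr ⟨hgt, hpw⟩
      · intro x hx
        rcases List.mem_cons.mp hx with rfl | hx
        · exact hlt
        · exact lt_trans hlt (hgt x hx)

theorem pv_walk_eq (d : PySem.Dict Int (List Int)) (ps : PySem.Set (Int × Int)) (maxlen : Int)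
    (hc : ∀ t1 t2, PySem.Set.contains ps (t1, t2) = (d.contains t1 && (d.getD t1 []).contains t2)) :
    ∀ (fuel : Nat) (p1 p2 : Int) (res : PySem.Set Int) (pm : Int),
      pvWalkB ps maxlen fuel (pvStepB ps maxlen p1 p2) (res, pm)
        = (PySem.Set.update res (pvRA d maxlen fuel p1 p2 []),
           ((pvRA d maxlen fuel p1 p2 []).getLast?).getD pm) := by
  intro fuel
  induction fuel with
  | zero => intro p1 p2 res pm; simp [pvWalkB, pvRA, PySem.Set.update_nil]
  | succ n ih =>
    intro p1 p2 res pm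
    simp only [pvRA, pv_step_eq d ps maxlen hc p1 p2]
    cases h : pvStepB ps maxlen p1 p2 with
    | none => simp [pvWalkB, PySem.Set.update_nil]
    | some t =>
      simp only [pvWalkB]
      rw [ih t.1 t.2 (PySem.Set.add res t.1) t.1]
      rw [pvRA_append d maxlen n t.1 t.2 ([] ++ [t.1])]
      simp only [List.nil_append, List.singleton_append]
      rw [PySem.Set.update_cons]
      congr 1
      cases c : pvRA d maxlen n t.1 t.2 [] with
      | nil => rfl
      | cons b tl =>
        have hs : (b :: tl).getLast?.isSome := by simp
        obtain ⟨x, hx⟩ := Option.isSome_iff_exists.mp hs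
        simp [List.getLast?_cons_cons, hx]

theorem pv_getLast_foldl_max :
    ∀ (t : List Int) (x : Int), (x :: t).Pairwise (· < ·) → (x :: t).getLast? = some (t.foldl max x) := by
  intro t
  induction t with
  | nil => intro x _; rfl
  | cons y t' ih =>
    intro x hp
    obtain ⟨hall, htail⟩ := List.pairwise_cons.mp hp
    have hxy : x < y := hall y (by simp)
    rw [List.getLast?_cons_cons, ih y htail]
    simp [max_eq_right (le_of_lt hxy)]

theorem pv_max_eq_getLast (s : List Int) (hp : s.Pairwise (· < ·)) (hne : s ≠ []) :
    PySem.List.max? s (fun x => x) = s.getLast? := by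
  cases s with
  | nil => exact absurd rfl hne
  | cons x t => rw [PySem.List.max?_id_cons, pv_getLast_foldl_max t x hp]

theorem pv_elem_run (d : PySem.Dict Int (List Int)) (ps : PySem.Set (Int × Int)) (maxlen : Int) (F : Nat)
    (hc : ∀ t1 t2, PySem.Set.contains ps (t1, t2) = (d.contains t1 && (d.getD t1 []).contains t2))
    (k v : Int) (l : List Int) (pm : Int) :
    pvWalkB ps maxlen F (pvStepB ps maxlen k v) (PySem.Set.ofList l, pm)
      = (PySem.Set.ofList ((pvGA d maxlen F k (l, pm) v).1), (pvGA d maxlen F k (l, pm) v).2) := by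
  rw [pv_walk_eq d ps maxlen hc]
  unfold pvGA
  by_cases hse : pvRA d maxlen F k v [] = []
  · simp [hse, PySem.Set.update_nil]
  · have hpw := (pv_chain_pairwise d ps maxlen hc F k v).1
    simp only [hse, ne_eq, not_false_eq_true, if_pos]
    rw [PySem.Set.ofList_append, pv_max_eq_getLast _ hpw hse]

theorem pv_skip (ps : PySem.Set (Int × Int)) (maxlen : Int) (F : Nat) (k : Int) :
    ∀ (t : List Int) (res : PySem.Set Int) (pm : Int),
      (t.map (fun v => (k, v, false))).foldl (pvFB ps maxlen F) (res, pm, true) = (res, pm, true) := by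
  intro t
  induction t with
  | nil => intro res pm; rfl
  | cons v t' ih =>
    intro res pm
    simp only [List.map_cons, List.foldl_cons]
    have : pvFB ps maxlen F (res, pm, true) (k, v, false) = (res, pm, true) := rfl
    rw [this, ih]

theorem pv_tail (d : PySem.Dict Int (List Int)) (ps : PySem.Set (Int × Int)) (maxlen : Int) (F : Nat)
    (hc : ∀ t1 t2, PySem.Set.contains ps (t1, t2) = (d.contains t1 && (d.getD t1 []).contains t2))
    (k : Int) :
    ∀ (t : List Int) (l : List Int) (pm : Int),
      (t.map (fun v => (k, v, false))).foldl (pvFB ps maxlen F) (PySem.Set.ofList l, pm, false)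
        = (PySem.Set.ofList ((t.foldl (pvGA d maxlen F k) (l, pm)).1),
           (t.foldl (pvGA d maxlen F k) (l, pm)).2, false) := by
  intro t
  induction t with
  | nil => intro l pm; rfl
  | cons v t' ih =>
    intro l pm
    simp only [List.map_cons, List.foldl_cons]
    have hstep : pvFB ps maxlen F (PySem.Set.ofList l, pm, false) (k, v, false)
        = (PySem.Set.ofList ((pvGA d maxlen F k (l, pm) v).1), (pvGA d maxlen F k (l, pm) v).2, false) := by
      unfold pvFB
      rw [pv_elem_run d ps maxlen F hc k v l pm]
      simp
    rw [hstep, ih]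

theorem pv_marker_map (k : Int) :
    ∀ (t : List Int) (s : Int), 1 ≤ s →
      ((PySem.List.enumerate t s).map (fun iv : Int × Int => (k, iv.2, iv.1 == 0)))
        = t.map (fun v => (k, v, false)) := by
  intro t
  induction t with
  | nil => intro s _; rfl
  | cons x t' ih =>
    intro s hs
    rw [PySem.List.enumerate_cons]
    simp only [List.map_cons]
    rw [ih (s + 1) (by omega)]
    have : (s == 0) = false := beq_false_of_ne (by omega)
    rw [this]

theorem pv_group (d : PySem.Dict Int (List Int)) (ps : PySem.Set (Int × Int)) (maxlen : Int) (F : Nat)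
    (hc : ∀ t1 t2, PySem.Set.contains ps (t1, t2) = (d.contains t1 && (d.getD t1 []).contains t2))
    (k : Int) (vs : List Int) (l : List Int) (pm : Int) (b : Bool) :
    ∃ b', ((PySem.List.enumerate vs).map (fun iv : Int × Int => (k, iv.2, iv.1 == 0))).foldl
            (pvFB ps maxlen F) (PySem.Set.ofList l, pm, b)
      = (PySem.Set.ofList ((if k < pm then (l, pm) else vs.foldl (pvGA d maxlen F k) (l, pm)).1),
         (if k < pm then (l, pm) else vs.foldl (pvGA d maxlen F k) (l, pm)).2, b') := by
  cases vs with
  | nil =>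
    refine ⟨b, ?_⟩
    by_cases hk : k < pm <;> simp [hk, PySem.List.enumerate]
  | cons v t =>
    rw [PySem.List.enumerate_cons]
    simp only [List.map_cons, List.foldl_cons]
    rw [show ((0 : Int) + 1) = 1 from rfl, pv_marker_map k t 1 (by omega)]
    by_cases hk : k < pm
    · refine ⟨true, ?_⟩
      have hfirst : pvFB ps maxlen F (PySem.Set.ofList l, pm, b) (k, v, (0 : Int) == 0)
          = (PySem.Set.ofList l, pm, true) := by
        unfold pvFB
        simp [hk]
      rw [hfirst, pv_skip ps maxlen F k t]
      simp [hk]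
    · refine ⟨false, ?_⟩
      have hfirst : pvFB ps maxlen F (PySem.Set.ofList l, pm, b) (k, v, (0 : Int) == 0)
          = (PySem.Set.ofList ((pvGA d maxlen F k (l, pm) v).1), (pvGA d maxlen F k (l, pm) v).2, false) := by
        unfold pvFB
        rw [pv_elem_run d ps maxlen F hc k v l pm]
        simp [hk]
      rw [hfirst, pv_tail d ps maxlen F hc k t]
      simp [hk]

theorem pv_master (d : PySem.Dict Int (List Int)) (ps : PySem.Set (Int × Int)) (maxlen : Int) (F : Nat)
    (hc : ∀ t1 t2, PySem.Set.contains ps (t1, t2) = (d.contains t1 && (d.getD t1 []).contains t2)) :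
    ∀ (ks : List Int) (l : List Int) (pm : Int) (b : Bool),
      ∃ b', (ks.flatMap (fun k =>
          (PySem.List.enumerate (PySem.List.sorted (d.getD k []) (fun x => x) false)).map
            (fun iv : Int × Int => (k, iv.2, iv.1 == 0)))).foldl
          (pvFB ps maxlen F) (PySem.Set.ofList l, pm, b)
        = (PySem.Set.ofList ((ks.foldl (pvFA d maxlen F) (l, pm)).1),
           (ks.foldl (pvFA d maxlen F) (l, pm)).2, b') := by
  intro ks
  induction ks with
  | nil => intro l pm b; exact ⟨b, rfl⟩
  | cons k ks' ih =>
    intro l pm b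
    rw [List.flatMap_cons, List.foldl_append, List.foldl_cons]
    obtain ⟨b1, hb1⟩ := pv_group d ps maxlen F hc k
      (PySem.List.sorted (d.getD k []) (fun x => x) false) l pm b
    rw [hb1]
    have hfa : pvFA d maxlen F (l, pm) k
        = (if k < pm then (l, pm)
           else (PySem.List.sorted (d.getD k []) (fun x => x) false).foldl (pvGA d maxlen F k) (l, pm)) := by
      unfold pvFA; rfl
    obtain ⟨b2, hb2⟩ := ih (if k < pm then (l, pm)
        else (PySem.List.sorted (d.getD k []) (fun x => x) false).foldl (pvGA d maxlen F k) (l, pm)).1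
      (if k < pm then (l, pm)
        else (PySem.List.sorted (d.getD k []) (fun x => x) false).foldl (pvGA d maxlen F k) (l, pm)).2 b1
    rw [hb2, hfa]
    exact ⟨b2, rfl⟩

-- ===== VERDICT (by name: the statement is the Claim_ definition above) =====
theorem detect_rough_commercials_spec : Claim_equal_detect_rough_commercials := by
  unfold Claim_equal_detect_rough_commercials
  intro pairs maxlen _
  unfold Spec_detect_rough_commercials
  rw [pv_portA_eq, pv_portB_eq]
  have hc := pv_contains_pairset (PySem.Dict.ofList pairs) (PySem.Dict.nodup_keys_ofList pairs)
  obtain ⟨b', hb⟩ := pv_master (PySem.Dict.ofList pairs)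
      (PySem.Set.ofList ((PySem.Dict.ofList pairs).items.flatMap (fun kv => kv.2.map (fun v => (kv.1, v)))))
      maxlen ((PySem.Dict.ofList pairs).keys.length + 1) hc
      (PySem.List.sorted (PySem.Dict.ofList pairs).keys (fun x => x) false) [] 0 false
  rw [show (PySem.Set.empty : PySem.Set Int) = PySem.Set.ofList [] from rfl, hb]
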